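-- pv_equiv track=rewrite | github.com/vlgiitr/deep_cache_replacement | utils/standard_algo.py | getFurthestAccessBlock
-- ===== SOURCE A (Python) =====
-- def getFurthestAccessBlock(C, OPT):
--     maxAccessPosition = -1
--     maxAccessBlock = -1
--     for cached_block in C:
--         if len(OPT[cached_block]) is 0:
--             return cached_block
--     for cached_block in C:
--         if OPT[cached_block][0] > maxAccessPosition:
--             maxAccessPosition = OPT[cached_block][0]
--             maxAccessBlock = cached_block
--     return maxAccessBlock
-- ===== SOURCE B (Python) =====
-- def getFurthestAccessBlock(C, OPT):
--     maxAccessPosition = -1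
--     maxAccessBlock = -1
--     for cached_block in C:
--         nxt = OPT[cached_block]
--         if not nxt:
--             return cached_block
--         if nxt[0] > maxAccessPosition:
--             maxAccessPosition = nxt[0]
--             maxAccessBlock = cached_block
--     return maxAccessBlock
-- ===== Notes on version B (the rewrite author's own statement) =====
-- stated objective: simpler
-- what changed: Fuses A's two sequential scans (one for an empty-future block, one for the furthest next access) into a single pass that returns immediately on an empty entry and otherwise tracks the running maximum, with one dict lookup per element instead of up to three.
import Mathlib
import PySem

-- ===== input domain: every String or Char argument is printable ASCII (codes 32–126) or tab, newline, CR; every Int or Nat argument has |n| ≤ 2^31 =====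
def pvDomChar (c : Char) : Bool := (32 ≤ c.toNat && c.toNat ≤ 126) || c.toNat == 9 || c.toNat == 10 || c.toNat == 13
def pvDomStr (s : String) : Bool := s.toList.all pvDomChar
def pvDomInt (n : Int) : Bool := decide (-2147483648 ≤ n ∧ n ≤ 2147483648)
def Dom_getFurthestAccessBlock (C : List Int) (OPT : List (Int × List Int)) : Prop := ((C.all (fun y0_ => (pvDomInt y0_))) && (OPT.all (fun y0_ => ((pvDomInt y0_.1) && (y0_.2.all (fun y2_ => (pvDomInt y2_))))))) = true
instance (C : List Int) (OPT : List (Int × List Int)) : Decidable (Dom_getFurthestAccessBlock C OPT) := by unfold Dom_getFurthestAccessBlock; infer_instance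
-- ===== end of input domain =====

-- B fuses A's two sequential scans over C into a single pass (early return on an
-- empty entry, otherwise running-maximum update); same return value everywhere A returns.


-- ===== PORT A =====
-- A's first loop: return the first cached_block whose OPT entry is empty.
-- (OPT[c] on a missing key raises KeyError in Python; Pre_ excludes exactly the
--  inputs where that lookup is reached, so the `.getD []` default is never observed
--  on admitted inputs.)
def pvFindEmptyA (C : List Int) (OPT : List (Int × List Int)) : Option Int :=
  match C with
  | [] => none
  | c :: rest =>
    if ((PySem.Dict.get? (PySem.Dict.mk OPT) c).getD []).length = 0 then some c
    else pvFindEmptyA rest OPT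

-- A's second loop: running strict maximum of OPT[c][0] with sentinel trackers.
def pvMaxLoopA (C : List Int) (OPT : List (Int × List Int))
    (maxAccessPosition maxAccessBlock : Int) : Int :=
  match C with
  | [] => maxAccessBlock
  | c :: rest =>
    let v := ((PySem.Dict.get? (PySem.Dict.mk OPT) c).getD []).headD 0
    if v > maxAccessPosition then pvMaxLoopA rest OPT v c
    else pvMaxLoopA rest OPT maxAccessPosition maxAccessBlock

def getFurthestAccessBlock (C : List Int) (OPT : List (Int × List Int)) : Int :=
  match pvFindEmptyA C OPT with
  | some c => c
  | none => pvMaxLoopA C OPT (-1) (-1)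

-- ===== PORT B =====
-- B's single fused loop.
def pvGoB (C : List Int) (OPT : List (Int × List Int))
    (maxAccessPosition maxAccessBlock : Int) : Int :=
  match C with
  | [] => maxAccessBlock
  | c :: rest =>
    match (PySem.Dict.get? (PySem.Dict.mk OPT) c).getD [] with
    | [] => c
    | v :: _ =>
      if v > maxAccessPosition then pvGoB rest OPT v c
      else pvGoB rest OPT maxAccessPosition maxAccessBlock

def getFurthestAccessBlock_alt (C : List Int) (OPT : List (Int × List Int)) : Int :=
  pvGoB C OPT (-1) (-1)

-- ===== PRECONDITION & SPEC =====
-- Pre_ excludes exactly the inputs on which Python A raises KeyError: a block of C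
-- missing from OPT that is reached before any block with an empty OPT entry.
def Pre_getFurthestAccessBlock (C : List Int) (OPT : List (Int × List Int)) : Prop :=
  ∀ i : Fin C.length, PySem.Dict.get? (PySem.Dict.mk OPT) C[i] = none →
    ∃ j : Fin C.length, j.val < i.val ∧ PySem.Dict.get? (PySem.Dict.mk OPT) C[j] = some []
instance (C : List Int) (OPT : List (Int × List Int)) : Decidable (Pre_getFurthestAccessBlock C OPT) := by unfold Pre_getFurthestAccessBlock; infer_instance
def pvWitness_getFurthestAccessBlock : List Int × (List (Int × List Int)) :=
  ([1, 2, 1], [(1, [3, 5]), (2, [0])])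
def Spec_getFurthestAccessBlock (C : List Int) (OPT : List (Int × List Int)) (out : Int) : Prop := out = getFurthestAccessBlock_alt C OPT
instance (C : List Int) (OPT : List (Int × List Int)) (out : Int) : Decidable (Spec_getFurthestAccessBlock C OPT out) := by unfold Spec_getFurthestAccessBlock; infer_instance

-- ===== CLAIM (what is proved, stated in full; the proofs are below) =====
def Claim_equal_getFurthestAccessBlock : Prop := ∀ (C : List Int) (OPT : List (Int × List Int)), Dom_getFurthestAccessBlock C OPT → Pre_getFurthestAccessBlock C OPT → Spec_getFurthestAccessBlock C OPT (getFurthestAccessBlock C OPT)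

-- ===== LEMMAS AND PROOFS =====
-- The two ports agree unconditionally (for any accumulator state): in the fused
-- loop the first empty entry is returned exactly where A's first scan finds it,
-- and otherwise the accumulator transitions coincide with A's second scan.
lemma pv_fuse (C : List Int) (OPT : List (Int × List Int)) :
    ∀ pos blk : Int,
      (match pvFindEmptyA C OPT with
       | some c => c
       | none => pvMaxLoopA C OPT pos blk) = pvGoB C OPT pos blk := by
  induction C with
  | nil => intro pos blk; simp [pvFindEmptyA, pvMaxLoopA, pvGoB]
  | cons c rest ih =>
    intro pos blk
    rcases h : (PySem.Dict.get? (PySem.Dict.mk OPT) c).getD [] with _ | ⟨v, tl⟩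
    · simp [pvFindEmptyA, pvGoB, h]
    · have hne : ¬ ((PySem.Dict.get? (PySem.Dict.mk OPT) c).getD []).length = 0 := by
        simp [h]
      rw [pvFindEmptyA, pvGoB, pvMaxLoopA, if_neg hne, h]
      by_cases hv : v > pos
      · simpa [hv] using ih v c
      · simpa [hv] using ih pos blk

-- ===== VERDICT (by name: the statement is the Claim_ definition above) =====
theorem getFurthestAccessBlock_spec : Claim_equal_getFurthestAccessBlock := by
  intro C OPT _ _
  unfold Spec_getFurthestAccessBlock getFurthestAccessBlock getFurthestAccessBlock_alt
  exact pv_fuse C OPT (-1) (-1)
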